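-- pv_equiv track=rewrite | github.com/Lt-kang/Coding_test | 프로그래머스/1/159994. 카드 뭉치/카드 뭉치.py | solution
-- ===== SOURCE A (Python) =====
-- def solution(cards1, cards2, goal):
--     sw = True
--     for goal_c in goal:
--         if cards1 and cards1[0] == goal_c:
--             cards1.remove(cards1[0])
--         elif cards2 and cards2[0] == goal_c:
--             cards2.remove(cards2[0])
--         else:
--             sw = False
--
--     return "Yes" if sw else "No"
-- ===== SOURCE B (Python) =====
-- def solution(cards1, cards2, goal):
--     i = j = 0
--     ok = True
--     for g in goal:
--         if i < len(cards1) and cards1[i] == g: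
--             i += 1
--         elif j < len(cards2) and cards2[j] == g:
--             j += 1
--         else:
--             ok = False
--     return "Yes" if ok else "No"
-- ===== Notes on version B (the rewrite author's own statement) =====
-- stated objective: alternative
-- what changed: Replaces A's destructive front-popping via list.remove (which mutates the input lists) with two index pointers advanced over the unchanged lists.
import Mathlib
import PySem

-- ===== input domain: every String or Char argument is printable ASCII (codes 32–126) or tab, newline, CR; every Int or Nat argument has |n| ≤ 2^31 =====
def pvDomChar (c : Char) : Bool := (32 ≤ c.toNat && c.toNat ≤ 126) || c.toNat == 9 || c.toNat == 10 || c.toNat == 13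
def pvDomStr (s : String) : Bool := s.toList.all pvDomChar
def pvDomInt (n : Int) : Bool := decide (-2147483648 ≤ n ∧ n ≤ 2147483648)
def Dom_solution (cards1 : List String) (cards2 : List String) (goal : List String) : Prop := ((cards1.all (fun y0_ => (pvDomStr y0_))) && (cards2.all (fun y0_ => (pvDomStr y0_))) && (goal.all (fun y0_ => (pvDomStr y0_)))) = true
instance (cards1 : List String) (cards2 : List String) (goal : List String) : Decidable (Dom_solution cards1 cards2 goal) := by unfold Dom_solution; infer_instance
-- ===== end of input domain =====

-- B replaces A's destructive front-popping via list.remove with two index pointers over the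
-- unchanged lists; equivalence is about the RETURN value only (Python A mutates cards1/cards2
-- in place, B does not).

-- ===== PORT A =====
-- A's loop over goal; cards1.remove(cards1[0]) removes the first element equal to cards1[0],
-- which is index 0 itself, i.e. it drops the head — ported exactly as dropping the head.
def solutionLoopA : List String → List String → Bool → List String → Bool
  | _,  _,  sw, [] => sw
  | c1, c2, sw, g :: gs =>
    if c1.head? = some g then solutionLoopA c1.tail c2 sw gs
    else if c2.head? = some g then solutionLoopA c1 c2.tail sw gs
    else solutionLoopA c1 c2 false gs

def solution (cards1 : List String) (cards2 : List String) (goal : List String) : String :=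
  if solutionLoopA cards1 cards2 true goal then "Yes" else "No"

-- ===== PORT B =====
-- B's loop: indices i into cards1 and j into cards2, lists never changed.
def solutionLoopB (c1 c2 : List String) : Nat → Nat → Bool → List String → Bool
  | _, _, ok, [] => ok
  | i, j, ok, g :: gs =>
    if i < c1.length ∧ c1.getD i "" = g then solutionLoopB c1 c2 (i+1) j ok gs
    else if j < c2.length ∧ c2.getD j "" = g then solutionLoopB c1 c2 i (j+1) ok gs
    else solutionLoopB c1 c2 i j false gs

def solution_alt (cards1 : List String) (cards2 : List String) (goal : List String) : String :=
  if solutionLoopB cards1 cards2 0 0 true goal then "Yes" else "No"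

-- ===== PRECONDITION & SPEC =====
def Spec_solution (cards1 : List String) (cards2 : List String) (goal : List String) (out : String) : Prop := out = solution_alt cards1 cards2 goal
instance (cards1 : List String) (cards2 : List String) (goal : List String) (out : String) : Decidable (Spec_solution cards1 cards2 goal out) := by unfold Spec_solution; infer_instance

-- ===== CLAIM (what is proved, stated in full; the proofs are below) =====
def Claim_equal_solution : Prop := ∀ (cards1 : List String) (cards2 : List String) (goal : List String), Dom_solution cards1 cards2 goal → Spec_solution cards1 cards2 goal (solution cards1 cards2 goal)

-- ===== LEMMAS AND PROOFS =====

-- the head of the unconsumed suffix is the indexed element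
lemma head?_drop (l : List String) (i : Nat) (h : i < l.length) :
    (l.drop i).head? = some (l.getD i "") := by
  rw [List.getD_eq_getElem l _ h]
  rw [List.head?_drop]
  simp [List.getElem?_eq_getElem h]

-- loop invariant: A's loop on the dropped suffixes equals B's loop with indices
lemma loop_agree (c1 c2 : List String) (goal : List String) :
    ∀ (i j : Nat) (sw : Bool),
      solutionLoopA (c1.drop i) (c2.drop j) sw goal = solutionLoopB c1 c2 i j sw goal := by
  induction goal with
  | nil => intro i j sw; rfl
  | cons g gs ih =>
    intro i j sw
    simp only [solutionLoopA, solutionLoopB]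
    by_cases h1 : i < c1.length ∧ c1.getD i "" = g
    · rw [if_pos, if_pos h1]
      · have : (c1.drop i).tail = c1.drop (i+1) := by
          simp [List.tail_drop]
        rw [this, ih]
      · rw [head?_drop c1 i h1.1, h1.2]
    · rw [if_neg, if_neg h1]
      · by_cases h2 : j < c2.length ∧ c2.getD j "" = g
        · rw [if_pos, if_pos h2]
          · have : (c2.drop j).tail = c2.drop (j+1) := by
              simp [List.tail_drop]
            rw [this, ih]
          · rw [head?_drop c2 j h2.1, h2.2]
        · rw [if_neg, if_neg h2]
          · exact ih i j false
          · intro hc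
            rcases h : c2.drop j with _ | ⟨a, rest⟩
            · simp [h] at hc
            · have hj : j < c2.length := by
                by_contra hge
                push Not at hge
                simp [List.drop_eq_nil_of_le hge] at h
              rw [head?_drop c2 j hj] at hc
              exact h2 ⟨hj, Option.some.inj hc⟩
      · intro hc
        rcases h : c1.drop i with _ | ⟨a, rest⟩
        · simp [h] at hc
        · have hi : i < c1.length := by
            by_contra hge
            push Not at hge
            simp [List.drop_eq_nil_of_le hge] at h
          rw [head?_drop c1 i hi] at hc
          exact h1 ⟨hi, Option.some.inj hc⟩

-- ===== VERDICT (by name: the statement is the Claim_ definition above) =====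
theorem solution_spec : Claim_equal_solution := by
  intro c1 c2 goal _
  unfold Spec_solution solution solution_alt
  have h := loop_agree c1 c2 goal 0 0 true
  simp only [List.drop_zero] at h
  rw [h]
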